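-- pv_equiv track=rewrite | github.com/binaryhong/Algorithm | 프로그래머스/lv0/120843. 공 던지기/공 던지기.py | solution
-- ===== SOURCE A (Python) =====
-- def solution(numbers, k):
--     new_list = []
--     if len(numbers) % 2 == 0:
--         for i in range(0,max(numbers)+1):
--             if i % 2 == 1:
--                 new_list.append(i)
--         new_list = new_list * k
--         return new_list[k - 1]
--     else:
--         new_list = numbers * k
--         return new_list[2*k-2]
-- ===== SOURCE B (Python) =====
-- def solution(numbers, k):
--     if len(numbers) % 2 == 0:
--         m = (max(numbers) + 1) // 2          # how many odd numbers lie in range(0, max+1)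
--         return 2 * ((k - 1) % m) + 1
--     return numbers[(2 * k - 2) % len(numbers)]
-- ===== Notes on version B (the rewrite author's own statement) =====
-- stated objective: faster
-- what changed: Replaces building the odd-number list (and the k-fold repetitions of it / of numbers) with O(1) modular-arithmetic indexing into the original data.
import Mathlib
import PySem

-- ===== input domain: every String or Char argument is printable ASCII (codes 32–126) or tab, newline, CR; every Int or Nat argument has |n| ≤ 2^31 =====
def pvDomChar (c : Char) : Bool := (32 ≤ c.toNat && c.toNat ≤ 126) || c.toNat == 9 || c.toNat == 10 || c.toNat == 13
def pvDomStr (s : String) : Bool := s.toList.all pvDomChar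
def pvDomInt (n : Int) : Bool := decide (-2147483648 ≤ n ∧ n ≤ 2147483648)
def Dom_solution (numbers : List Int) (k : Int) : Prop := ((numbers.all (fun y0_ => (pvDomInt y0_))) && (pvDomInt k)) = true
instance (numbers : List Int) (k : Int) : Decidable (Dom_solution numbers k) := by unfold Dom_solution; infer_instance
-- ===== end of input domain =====

-- B replaces list construction/repetition by O(1) modular-arithmetic indexing (asymptotically faster).

-- ===== PORT A =====
-- literal port of A: build the odd list up to max(numbers), repeat it (or numbers) k times, index.
def solution (numbers : List Int) (k : Int) : Int :=
  if numbers.length % 2 == 0 then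
    let mx := (PySem.List.max? numbers (fun x => x)).getD 0   -- max(numbers); none = ValueError, excluded by Pre_
    let new_list := (PySem.List.pyRange 0 (mx + 1) 1).foldl
        (fun acc i => if PySem.Int.mod i 2 == 1 then acc ++ [i] else acc) []
    (PySem.List.pyGet? (PySem.List.pyRepeat new_list k) (k - 1)).getD 0   -- none = IndexError, excluded by Pre_
  else
    (PySem.List.pyGet? (PySem.List.pyRepeat numbers k) (2*k - 2)).getD 0  -- none = IndexError, excluded by Pre_

-- ===== PORT B =====
def solution_alt (numbers : List Int) (k : Int) : Int :=
  if numbers.length % 2 == 0 then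
    let m := PySem.Int.floordiv ((PySem.List.max? numbers (fun x => x)).getD 0 + 1) 2
    2 * PySem.Int.mod (k - 1) m + 1
  else
    (PySem.List.pyGet? numbers (PySem.Int.mod (2*k - 2) (numbers.length : Int))).getD 0

-- ===== PRECONDITION & SPEC =====
-- Pre_ excludes exactly the inputs where A raises: ValueError (max of []) or IndexError
-- (k ≤ 0, no positive element in the even case, or 2k-2 beyond len*k in the odd case).
def Pre_solution (numbers : List Int) (k : Int) : Prop :=
  1 ≤ k ∧
  (if numbers.length % 2 == 0 then ∃ x ∈ numbers, 1 ≤ x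
   else 2*k - 2 < (numbers.length : Int) * k)
instance (numbers : List Int) (k : Int) : Decidable (Pre_solution numbers k) := by
  unfold Pre_solution; infer_instance
def pvWitness_solution : List Int × Int := ([2, 1], 3)

def Spec_solution (numbers : List Int) (k : Int) (out : Int) : Prop := out = solution_alt numbers k
instance (numbers : List Int) (k : Int) (out : Int) : Decidable (Spec_solution numbers k out) := by unfold Spec_solution; infer_instance

-- ===== CLAIM (what is proved, stated in full; the proofs are below) =====
def Claim_equal_solution : Prop := ∀ (numbers : List Int) (k : Int), Dom_solution numbers k → Pre_solution numbers k → Spec_solution numbers k (solution numbers k)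

-- ===== LEMMAS AND PROOFS =====

-- the odd naturals below N, in order
lemma odds_filter (N : Nat) :
    (List.range N).filter (fun j => j % 2 == 1) = (List.range (N/2)).map (fun j => 2*j+1) := by
  induction N with
  | zero => rfl
  | succ n ih =>
    by_cases hp : n % 2 = 1
    · have h2 : (n+1)/2 = n/2 + 1 := by omega
      have hn : (n % 2 == 1) = true := by simp [hp]
      rw [List.range_succ, List.filter_append, ih, h2, List.range_succ]
      simp [hn]; omega
    · have h2 : (n+1)/2 = n/2 := by omega
      have hn : (n % 2 == 1) = false := by simp [hp]
      rw [List.range_succ, List.filter_append, ih, h2]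
      simp [hn]

-- indexing a k-fold repetition is indexing modulo the length
lemma flatten_rep_get {α : Type} (xs : List α) (m j : Nat) (h : j < m * xs.length) :
    ((List.replicate m xs).flatten)[j]? = xs[j % xs.length]? := by
  induction m generalizing j with
  | zero => omega
  | succ n ih =>
    have hxs : 0 < xs.length := by by_contra h'; simp at h'; simp [h'] at h
    have hmul : (n+1) * xs.length = n * xs.length + xs.length := by ring
    rw [List.replicate_succ, List.flatten_cons]
    by_cases hj : j < xs.length
    · rw [List.getElem?_append_left hj, Nat.mod_eq_of_lt hj]
    · have hj' : xs.length ≤ j := by omega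
      rw [List.getElem?_append_right hj', ih (j - xs.length) (by omega), Nat.mod_eq_sub_mod hj']

-- A's even branch list of odds, fully characterised
lemma odds_list_eq (M : Int) :
    (PySem.List.pyRange 0 (M + 1) 1).foldl
        (fun acc i => if PySem.Int.mod i 2 == 1 then acc ++ [i] else acc) []
      = (List.range ((M+1).toNat / 2)).map (fun j => ((2*j+1 : Nat) : Int)) := by
  rw [PySem.List.foldl_append_if, List.nil_append]
  have h1 : PySem.List.pyRange 0 (M + 1) 1 = (List.range (M+1).toNat).map (fun j => ((j : Nat) : Int)) := by
    rw [PySem.List.pyRange_one]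
    simp
  rw [h1, List.filter_map]
  have h2 : ((fun i => PySem.Int.mod i 2 == 1) ∘ (fun j : Nat => ((j : Nat) : Int))) = (fun j : Nat => j % 2 == 1) := by
    funext j
    simp [Function.comp]
    omega
  rw [h2, odds_filter]
  simp

-- the even branch of both programs, with max(numbers) = m abstracted out
lemma even_branch_eq (m k : Int) (hm : 1 ≤ m) (hk : 1 ≤ k) :
    (PySem.List.pyGet? (PySem.List.pyRepeat
        ((PySem.List.pyRange 0 (m + 1) 1).foldl
          (fun acc i => if PySem.Int.mod i 2 == 1 then acc ++ [i] else acc) []) k) (k - 1)).getD 0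
      = 2 * PySem.Int.mod (k - 1) (PySem.Int.floordiv (m + 1) 2) + 1 := by
  rw [odds_list_eq]
  set mN : Nat := (m+1).toNat / 2 with hmN
  have hmN1 : 1 ≤ mN := by
    have : 2 ≤ (m+1).toNat := by omega
    omega
  set odds : List Int := (List.range mN).map (fun j => ((2*j+1 : Nat) : Int)) with hodds
  have hlen : odds.length = mN := by simp [hodds]
  have hrep : PySem.List.pyRepeat odds k = (List.replicate k.toNat odds).flatten := rfl
  have hlenrep : ((List.replicate k.toNat odds).flatten).length = k.toNat * mN := by
    simp [hlen]
  have hidx : (k - 1).toNat < k.toNat * mN := by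
    have : k.toNat * 1 ≤ k.toNat * mN := Nat.mul_le_mul_left _ hmN1
    omega
  rw [hrep, PySem.List.pyGet?_of_nonneg_of_lt _ (by omega) (by rw [hlenrep]; omega),
      flatten_rep_get odds k.toNat (k-1).toNat (by rw [hlen]; exact hidx), hlen]
  have hget : odds[(k - 1).toNat % mN]? = some ((2 * ((k-1).toNat % mN) + 1 : Nat) : Int) := by
    rw [hodds, List.getElem?_map, List.getElem?_range (Nat.mod_lt _ (by omega))]
    rfl
  rw [hget]
  have hfd : PySem.Int.floordiv (m + 1) 2 = (mN : Int) := by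
    rw [PySem.Int.floordiv_eq_ediv_of_pos (by omega), hmN]
    omega
  rw [hfd, PySem.Int.mod_eq_emod_of_pos (by omega : (0:Int) < (mN:Int))]
  have hc : ((k - 1).toNat : Int) = k - 1 := Int.toNat_of_nonneg (by omega)
  have : (((k - 1).toNat % mN : Nat) : Int) = (k - 1) % (mN : Int) := by
    push_cast [hc]
    rfl
  simp only [Option.getD_some]
  push_cast [this]
  ring

theorem solution_spec : Claim_equal_solution := by
  intro numbers k _ hpre
  unfold Spec_solution solution solution_alt
  obtain ⟨hk, hrest⟩ := hpre
  by_cases hpar : numbers.length % 2 == 0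
  · -- even length
    rw [if_pos hpar] at hrest
    rw [if_pos hpar, if_pos hpar]
    obtain ⟨x, hx, hx1⟩ := hrest
    have hne : numbers ≠ [] := by rintro rfl; exact absurd hx (List.not_mem_nil)
    obtain ⟨m, hm⟩ : ∃ m, PySem.List.max? numbers (fun y => y) = some m := by
      rcases Option.eq_none_or_eq_some (PySem.List.max? numbers fun y => y) with h1 | h1
      · rw [PySem.List.max?_eq_none_iff] at h1; exact absurd h1 hne
      · exact h1
    have hm1 : 1 ≤ m := le_trans hx1 (PySem.List.max?_isMax hm x hx)
    rw [hm]
    simp only [Option.getD_some]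
    exact even_branch_eq m k hm1 hk
  · -- odd length
    rw [if_neg hpar] at hrest
    rw [if_neg hpar, if_neg hpar]
    have hn1 : 1 ≤ numbers.length := by
      rcases Nat.eq_zero_or_pos numbers.length with h | h
      · simp [h] at hpar
      · exact h
    have hi0 : (0:Int) ≤ 2*k - 2 := by omega
    have hrep : PySem.List.pyRepeat numbers k = (List.replicate k.toNat numbers).flatten := rfl
    have hlenrep : ((List.replicate k.toNat numbers).flatten).length = k.toNat * numbers.length := by
      simp
    have hcast : ((k.toNat * numbers.length : Nat) : Int) = k * (numbers.length : Int) := by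
      push_cast [Int.toNat_of_nonneg (by omega : (0:Int) ≤ k)]
      ring
    have hidx : ((2*k - 2).toNat) < k.toNat * numbers.length := by
      have h1 : ((2*k - 2).toNat : Int) < k * (numbers.length : Int) := by
        rw [Int.toNat_of_nonneg hi0]
        have := mul_comm k (numbers.length : Int)
        omega
      rw [← hcast] at h1
      exact_mod_cast h1
    rw [hrep, PySem.List.pyGet?_of_nonneg_of_lt _ hi0 (by
        rw [hlenrep, hcast]
        have := mul_comm k (numbers.length : Int)
        omega),
      flatten_rep_get numbers k.toNat (2*k - 2).toNat hidx]
    have hnpos : (0:Int) < (numbers.length : Int) := by exact_mod_cast hn1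
    rw [PySem.Int.mod_eq_emod_of_pos hnpos]
    have hr0 : (0:Int) ≤ (2*k - 2) % (numbers.length : Int) := Int.emod_nonneg _ (by omega)
    have hrlt : (2*k - 2) % (numbers.length : Int) < (numbers.length : Int) := Int.emod_lt_of_pos _ hnpos
    rw [PySem.List.pyGet?_of_nonneg_of_lt numbers hr0 hrlt]
    have hmodc : (((2*k - 2).toNat % numbers.length : Nat) : Int) = (2*k - 2) % (numbers.length : Int) := by
      push_cast [Int.toNat_of_nonneg hi0]
      rfl
    have hfin : ((2 * k - 2) % (numbers.length : Int)).toNat = (2 * k - 2).toNat % numbers.length := by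
      omega
    rw [hfin]
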